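-- pv_equiv track=rewrite | github.com/LenaHB/Baby-Care-AI | artifacts/flask-backend/app.py | _symptom_flags
-- ===== SOURCE A (Python) =====
-- def _symptom_flags(symptoms):
--     s = {str(x).strip().lower() for x in symptoms}
--
--     return {
--         "symptom_fever": int("fever" in s),
--         "symptom_cough": int("cough" in s),
--         "symptom_vomiting": int("vomiting" in s),
--         "symptom_diarrhea": int("diarrhea" in s),
--         "symptom_rash": int("rash" in s),
--         "symptom_lethargy": int("lethargy" in s),
--         "symptom_poor_feeding": int("poor feeding" in s),
--         "symptom_difficulty_breathing": int("difficulty breathing" in s),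
--         "symptom_dehydration": int("dehydration" in s),
--     }
-- ===== SOURCE B (Python) =====
-- _FLAG_KEYS = [
--     "symptom_fever", "symptom_cough", "symptom_vomiting", "symptom_diarrhea",
--     "symptom_rash", "symptom_lethargy", "symptom_poor_feeding",
--     "symptom_difficulty_breathing", "symptom_dehydration",
-- ]
--
-- _LABEL_TO_FLAG = {
--     "fever": "symptom_fever",
--     "cough": "symptom_cough",
--     "vomiting": "symptom_vomiting",
--     "diarrhea": "symptom_diarrhea",
--     "rash": "symptom_rash",
--     "lethargy": "symptom_lethargy",
--     "poor feeding": "symptom_poor_feeding",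
--     "difficulty breathing": "symptom_difficulty_breathing",
--     "dehydration": "symptom_dehydration",
-- }
--
--
-- def _symptom_flags(symptoms):
--     out = {k: 0 for k in _FLAG_KEYS}
--     for x in symptoms:
--         k = _LABEL_TO_FLAG.get(str(x).strip().lower())
--         if k is not None:
--             out[k] = 1
--     return out
-- ===== Notes on version B (the rewrite author's own statement) =====
-- stated objective: alternative
-- what changed: B replaces A's build-a-set-then-nine-membership-tests with a single input-driven pass: a constant label-to-flag map, a result dict preinitialized to nine zeros, and one loop over symptoms that sets the matching flag to 1.
import Mathlib
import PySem

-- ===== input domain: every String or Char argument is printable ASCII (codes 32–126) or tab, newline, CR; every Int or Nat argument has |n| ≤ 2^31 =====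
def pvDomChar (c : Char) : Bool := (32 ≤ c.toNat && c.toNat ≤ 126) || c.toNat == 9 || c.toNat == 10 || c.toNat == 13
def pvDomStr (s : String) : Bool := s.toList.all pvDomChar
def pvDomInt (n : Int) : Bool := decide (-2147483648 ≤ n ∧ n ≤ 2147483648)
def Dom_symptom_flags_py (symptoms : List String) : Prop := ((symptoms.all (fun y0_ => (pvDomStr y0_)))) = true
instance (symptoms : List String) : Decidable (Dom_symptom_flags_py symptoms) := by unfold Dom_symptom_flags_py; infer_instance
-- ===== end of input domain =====

-- B replaces A's build-a-set-then-nine-membership-tests with one input-driven pass over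
-- `symptoms` (constant label→flag map, result dict preinitialized to nine zeros); same cost.

-- str(x).strip().lower() for a string x
def pvNorm (x : String) : String := PySem.Str.lower (PySem.Str.strip x)

-- ===== PORT A =====
def symptom_flags_py (symptoms : List String) : List (String × Int) :=
  let s : PySem.Set String := PySem.Set.ofList (symptoms.map (fun x => pvNorm x))
  [("symptom_fever", if PySem.Set.contains s "fever" then (1:Int) else 0),
   ("symptom_cough", if PySem.Set.contains s "cough" then (1:Int) else 0),
   ("symptom_vomiting", if PySem.Set.contains s "vomiting" then (1:Int) else 0),
   ("symptom_diarrhea", if PySem.Set.contains s "diarrhea" then (1:Int) else 0),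
   ("symptom_rash", if PySem.Set.contains s "rash" then (1:Int) else 0),
   ("symptom_lethargy", if PySem.Set.contains s "lethargy" then (1:Int) else 0),
   ("symptom_poor_feeding", if PySem.Set.contains s "poor feeding" then (1:Int) else 0),
   ("symptom_difficulty_breathing", if PySem.Set.contains s "difficulty breathing" then (1:Int) else 0),
   ("symptom_dehydration", if PySem.Set.contains s "dehydration" then (1:Int) else 0)]

-- ===== PORT B =====
def pvLabelToFlag : PySem.Dict String String := PySem.Dict.mk
  [("fever", "symptom_fever"),
   ("cough", "symptom_cough"),
   ("vomiting", "symptom_vomiting"),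
   ("diarrhea", "symptom_diarrhea"),
   ("rash", "symptom_rash"),
   ("lethargy", "symptom_lethargy"),
   ("poor feeding", "symptom_poor_feeding"),
   ("difficulty breathing", "symptom_difficulty_breathing"),
   ("dehydration", "symptom_dehydration")]

def pvInitFlags : PySem.Dict String Int := PySem.Dict.mk
  [("symptom_fever", (0:Int)),
   ("symptom_cough", (0:Int)),
   ("symptom_vomiting", (0:Int)),
   ("symptom_diarrhea", (0:Int)),
   ("symptom_rash", (0:Int)),
   ("symptom_lethargy", (0:Int)),
   ("symptom_poor_feeding", (0:Int)),
   ("symptom_difficulty_breathing", (0:Int)),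
   ("symptom_dehydration", (0:Int))]

def pvStep (d : PySem.Dict String Int) (x : String) : PySem.Dict String Int :=
  match PySem.Dict.get? pvLabelToFlag (pvNorm x) with
  | some k => d.insert k 1
  | none => d

def symptom_flags_py_alt (symptoms : List String) : List (String × Int) :=
  (symptoms.foldl pvStep pvInitFlags).items

-- ===== PRECONDITION & SPEC =====
def Spec_symptom_flags_py (symptoms : List String) (out : List (String × Int)) : Prop := out = symptom_flags_py_alt symptoms
instance (symptoms : List String) (out : List (String × Int)) : Decidable (Spec_symptom_flags_py symptoms out) := by unfold Spec_symptom_flags_py; infer_instance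

-- ===== CLAIM (what is proved, stated in full; the proofs are below) =====
def Claim_equal_symptom_flags_py : Prop := ∀ (symptoms : List String), Dom_symptom_flags_py symptoms → Spec_symptom_flags_py symptoms (symptom_flags_py symptoms)

-- ===== LEMMAS AND PROOFS =====

-- overwriting one of the nine preexisting flag keys with 1, as a dict literal
theorem pv_ins1 (v1 v2 v3 v4 v5 v6 v7 v8 v9 : Int) :
    (PySem.Dict.mk [("symptom_fever", v1), ("symptom_cough", v2), ("symptom_vomiting", v3), ("symptom_diarrhea", v4), ("symptom_rash", v5), ("symptom_lethargy", v6), ("symptom_poor_feeding", v7), ("symptom_difficulty_breathing", v8), ("symptom_dehydration", v9)]).insert "symptom_fever" (1:Int) = PySem.Dict.mk [("symptom_fever", (1:Int)), ("symptom_cough", v2), ("symptom_vomiting", v3), ("symptom_diarrhea", v4), ("symptom_rash", v5), ("symptom_lethargy", v6), ("symptom_poor_feeding", v7), ("symptom_difficulty_breathing", v8), ("symptom_dehydration", v9)] := by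
  apply PySem.Dict.ext
  rw [PySem.Dict.items_insert]
  simp

theorem pv_ins2 (v1 v2 v3 v4 v5 v6 v7 v8 v9 : Int) :
    (PySem.Dict.mk [("symptom_fever", v1), ("symptom_cough", v2), ("symptom_vomiting", v3), ("symptom_diarrhea", v4), ("symptom_rash", v5), ("symptom_lethargy", v6), ("symptom_poor_feeding", v7), ("symptom_difficulty_breathing", v8), ("symptom_dehydration", v9)]).insert "symptom_cough" (1:Int) = PySem.Dict.mk [("symptom_fever", v1), ("symptom_cough", (1:Int)), ("symptom_vomiting", v3), ("symptom_diarrhea", v4), ("symptom_rash", v5), ("symptom_lethargy", v6), ("symptom_poor_feeding", v7), ("symptom_difficulty_breathing", v8), ("symptom_dehydration", v9)] := by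
  apply PySem.Dict.ext
  rw [PySem.Dict.items_insert]
  simp

theorem pv_ins3 (v1 v2 v3 v4 v5 v6 v7 v8 v9 : Int) :
    (PySem.Dict.mk [("symptom_fever", v1), ("symptom_cough", v2), ("symptom_vomiting", v3), ("symptom_diarrhea", v4), ("symptom_rash", v5), ("symptom_lethargy", v6), ("symptom_poor_feeding", v7), ("symptom_difficulty_breathing", v8), ("symptom_dehydration", v9)]).insert "symptom_vomiting" (1:Int) = PySem.Dict.mk [("symptom_fever", v1), ("symptom_cough", v2), ("symptom_vomiting", (1:Int)), ("symptom_diarrhea", v4), ("symptom_rash", v5), ("symptom_lethargy", v6), ("symptom_poor_feeding", v7), ("symptom_difficulty_breathing", v8), ("symptom_dehydration", v9)] := by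
  apply PySem.Dict.ext
  rw [PySem.Dict.items_insert]
  simp

theorem pv_ins4 (v1 v2 v3 v4 v5 v6 v7 v8 v9 : Int) :
    (PySem.Dict.mk [("symptom_fever", v1), ("symptom_cough", v2), ("symptom_vomiting", v3), ("symptom_diarrhea", v4), ("symptom_rash", v5), ("symptom_lethargy", v6), ("symptom_poor_feeding", v7), ("symptom_difficulty_breathing", v8), ("symptom_dehydration", v9)]).insert "symptom_diarrhea" (1:Int) = PySem.Dict.mk [("symptom_fever", v1), ("symptom_cough", v2), ("symptom_vomiting", v3), ("symptom_diarrhea", (1:Int)), ("symptom_rash", v5), ("symptom_lethargy", v6), ("symptom_poor_feeding", v7), ("symptom_difficulty_breathing", v8), ("symptom_dehydration", v9)] := by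
  apply PySem.Dict.ext
  rw [PySem.Dict.items_insert]
  simp

theorem pv_ins5 (v1 v2 v3 v4 v5 v6 v7 v8 v9 : Int) :
    (PySem.Dict.mk [("symptom_fever", v1), ("symptom_cough", v2), ("symptom_vomiting", v3), ("symptom_diarrhea", v4), ("symptom_rash", v5), ("symptom_lethargy", v6), ("symptom_poor_feeding", v7), ("symptom_difficulty_breathing", v8), ("symptom_dehydration", v9)]).insert "symptom_rash" (1:Int) = PySem.Dict.mk [("symptom_fever", v1), ("symptom_cough", v2), ("symptom_vomiting", v3), ("symptom_diarrhea", v4), ("symptom_rash", (1:Int)), ("symptom_lethargy", v6), ("symptom_poor_feeding", v7), ("symptom_difficulty_breathing", v8), ("symptom_dehydration", v9)] := by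
  apply PySem.Dict.ext
  rw [PySem.Dict.items_insert]
  simp

theorem pv_ins6 (v1 v2 v3 v4 v5 v6 v7 v8 v9 : Int) :
    (PySem.Dict.mk [("symptom_fever", v1), ("symptom_cough", v2), ("symptom_vomiting", v3), ("symptom_diarrhea", v4), ("symptom_rash", v5), ("symptom_lethargy", v6), ("symptom_poor_feeding", v7), ("symptom_difficulty_breathing", v8), ("symptom_dehydration", v9)]).insert "symptom_lethargy" (1:Int) = PySem.Dict.mk [("symptom_fever", v1), ("symptom_cough", v2), ("symptom_vomiting", v3), ("symptom_diarrhea", v4), ("symptom_rash", v5), ("symptom_lethargy", (1:Int)), ("symptom_poor_feeding", v7), ("symptom_difficulty_breathing", v8), ("symptom_dehydration", v9)] := by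
  apply PySem.Dict.ext
  rw [PySem.Dict.items_insert]
  simp

theorem pv_ins7 (v1 v2 v3 v4 v5 v6 v7 v8 v9 : Int) :
    (PySem.Dict.mk [("symptom_fever", v1), ("symptom_cough", v2), ("symptom_vomiting", v3), ("symptom_diarrhea", v4), ("symptom_rash", v5), ("symptom_lethargy", v6), ("symptom_poor_feeding", v7), ("symptom_difficulty_breathing", v8), ("symptom_dehydration", v9)]).insert "symptom_poor_feeding" (1:Int) = PySem.Dict.mk [("symptom_fever", v1), ("symptom_cough", v2), ("symptom_vomiting", v3), ("symptom_diarrhea", v4), ("symptom_rash", v5), ("symptom_lethargy", v6), ("symptom_poor_feeding", (1:Int)), ("symptom_difficulty_breathing", v8), ("symptom_dehydration", v9)] := by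
  apply PySem.Dict.ext
  rw [PySem.Dict.items_insert]
  simp

theorem pv_ins8 (v1 v2 v3 v4 v5 v6 v7 v8 v9 : Int) :
    (PySem.Dict.mk [("symptom_fever", v1), ("symptom_cough", v2), ("symptom_vomiting", v3), ("symptom_diarrhea", v4), ("symptom_rash", v5), ("symptom_lethargy", v6), ("symptom_poor_feeding", v7), ("symptom_difficulty_breathing", v8), ("symptom_dehydration", v9)]).insert "symptom_difficulty_breathing" (1:Int) = PySem.Dict.mk [("symptom_fever", v1), ("symptom_cough", v2), ("symptom_vomiting", v3), ("symptom_diarrhea", v4), ("symptom_rash", v5), ("symptom_lethargy", v6), ("symptom_poor_feeding", v7), ("symptom_difficulty_breathing", (1:Int)), ("symptom_dehydration", v9)] := by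
  apply PySem.Dict.ext
  rw [PySem.Dict.items_insert]
  simp

theorem pv_ins9 (v1 v2 v3 v4 v5 v6 v7 v8 v9 : Int) :
    (PySem.Dict.mk [("symptom_fever", v1), ("symptom_cough", v2), ("symptom_vomiting", v3), ("symptom_diarrhea", v4), ("symptom_rash", v5), ("symptom_lethargy", v6), ("symptom_poor_feeding", v7), ("symptom_difficulty_breathing", v8), ("symptom_dehydration", v9)]).insert "symptom_dehydration" (1:Int) = PySem.Dict.mk [("symptom_fever", v1), ("symptom_cough", v2), ("symptom_vomiting", v3), ("symptom_diarrhea", v4), ("symptom_rash", v5), ("symptom_lethargy", v6), ("symptom_poor_feeding", v7), ("symptom_difficulty_breathing", v8), ("symptom_dehydration", (1:Int))] := by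
  apply PySem.Dict.ext
  rw [PySem.Dict.items_insert]
  simp

-- invariant of B's loop: starting from the nine-key dict, the fold sets flag i to 1
-- exactly when its label occurs among the normalized symptoms, else keeps its value
theorem pv_fold_items (xs : List String) : ∀ (v1 v2 v3 v4 v5 v6 v7 v8 v9 : Int),
    (xs.foldl pvStep (PySem.Dict.mk [("symptom_fever", v1), ("symptom_cough", v2), ("symptom_vomiting", v3), ("symptom_diarrhea", v4), ("symptom_rash", v5), ("symptom_lethargy", v6), ("symptom_poor_feeding", v7), ("symptom_difficulty_breathing", v8), ("symptom_dehydration", v9)])).items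
    = [("symptom_fever", if "fever" ∈ xs.map pvNorm then (1:Int) else v1),
     ("symptom_cough", if "cough" ∈ xs.map pvNorm then (1:Int) else v2),
     ("symptom_vomiting", if "vomiting" ∈ xs.map pvNorm then (1:Int) else v3),
     ("symptom_diarrhea", if "diarrhea" ∈ xs.map pvNorm then (1:Int) else v4),
     ("symptom_rash", if "rash" ∈ xs.map pvNorm then (1:Int) else v5),
     ("symptom_lethargy", if "lethargy" ∈ xs.map pvNorm then (1:Int) else v6),
     ("symptom_poor_feeding", if "poor feeding" ∈ xs.map pvNorm then (1:Int) else v7),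
     ("symptom_difficulty_breathing", if "difficulty breathing" ∈ xs.map pvNorm then (1:Int) else v8),
     ("symptom_dehydration", if "dehydration" ∈ xs.map pvNorm then (1:Int) else v9)] := by
  induction xs with
  | nil => intro v1 v2 v3 v4 v5 v6 v7 v8 v9; simp
  | cons x xs ih =>
    intro v1 v2 v3 v4 v5 v6 v7 v8 v9
    simp only [List.foldl_cons, List.map_cons, List.mem_cons, pvStep, pvLabelToFlag,
      PySem.Dict.get?_mk_cons]
    by_cases h1 : ("fever" == pvNorm x) = true
    · simp only [if_pos h1]; rw [pv_ins1, ih, ← eq_of_beq h1]; simp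
    simp only [if_neg h1]
    by_cases h2 : ("cough" == pvNorm x) = true
    · simp only [if_pos h2]; rw [pv_ins2, ih, ← eq_of_beq h2]; simp
    simp only [if_neg h2]
    by_cases h3 : ("vomiting" == pvNorm x) = true
    · simp only [if_pos h3]; rw [pv_ins3, ih, ← eq_of_beq h3]; simp
    simp only [if_neg h3]
    by_cases h4 : ("diarrhea" == pvNorm x) = true
    · simp only [if_pos h4]; rw [pv_ins4, ih, ← eq_of_beq h4]; simp
    simp only [if_neg h4]
    by_cases h5 : ("rash" == pvNorm x) = true
    · simp only [if_pos h5]; rw [pv_ins5, ih, ← eq_of_beq h5]; simp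
    simp only [if_neg h5]
    by_cases h6 : ("lethargy" == pvNorm x) = true
    · simp only [if_pos h6]; rw [pv_ins6, ih, ← eq_of_beq h6]; simp
    simp only [if_neg h6]
    by_cases h7 : ("poor feeding" == pvNorm x) = true
    · simp only [if_pos h7]; rw [pv_ins7, ih, ← eq_of_beq h7]; simp
    simp only [if_neg h7]
    by_cases h8 : ("difficulty breathing" == pvNorm x) = true
    · simp only [if_pos h8]; rw [pv_ins8, ih, ← eq_of_beq h8]; simp
    simp only [if_neg h8]
    by_cases h9 : ("dehydration" == pvNorm x) = true
    · simp only [if_pos h9]; rw [pv_ins9, ih, ← eq_of_beq h9]; simp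
    simp only [if_neg h9]
    have hnone : (PySem.Dict.mk ([] : List (String × String))).get? (pvNorm x) = none := rfl
    simp only [hnone]
    rw [ih]
    simp_all

-- ===== VERDICT (by name: the statement is the Claim_ definition above) =====
theorem symptom_flags_py_spec : Claim_equal_symptom_flags_py := by
  intro symptoms _
  unfold Spec_symptom_flags_py symptom_flags_py symptom_flags_py_alt pvInitFlags
  rw [pv_fold_items]
  simp [PySem.Set.contains, PySem.Set.mem_ofList]
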